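-- pv_equiv track=rewrite | github.com/syth0le/practice-coding-of-a-VSU-student | Python/numbers_dictribution.py | relocate_data
-- ===== SOURCE A (Python) =====
-- def relocate_data(data: dict, N: int) -> dict:
--     length = len(data)
--     difference = N % length
--     temp = []
--     for key in data:
--         if difference > 0:
--             temp.append(key)
--             difference -= 1
--         else:
--             break
--
--     for key in temp:
--         data[key] = data.pop(key)
--
--     return data
-- ===== SOURCE B (Python) =====
-- def relocate_data(data: dict, N: int) -> dict:
--     diff = N % len(data)  # computed first so an empty dict still raises ZeroDivisionError
--     keys = list(data)
--     rot = keys[diff:] + keys[:diff]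
--     values = dict(data)
--     data.clear()
--     data.update((k, values[k]) for k in rot)
--     return data
-- ===== Notes on version B (the rewrite author's own statement) =====
-- stated objective: simpler
-- what changed: B computes the rotated key order directly by slicing (keys[diff:] + keys[:diff]) and rebuilds the dict in place with clear/update, instead of A's loop that pops and re-inserts only the first N%len keys one at a time.
import Mathlib
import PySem

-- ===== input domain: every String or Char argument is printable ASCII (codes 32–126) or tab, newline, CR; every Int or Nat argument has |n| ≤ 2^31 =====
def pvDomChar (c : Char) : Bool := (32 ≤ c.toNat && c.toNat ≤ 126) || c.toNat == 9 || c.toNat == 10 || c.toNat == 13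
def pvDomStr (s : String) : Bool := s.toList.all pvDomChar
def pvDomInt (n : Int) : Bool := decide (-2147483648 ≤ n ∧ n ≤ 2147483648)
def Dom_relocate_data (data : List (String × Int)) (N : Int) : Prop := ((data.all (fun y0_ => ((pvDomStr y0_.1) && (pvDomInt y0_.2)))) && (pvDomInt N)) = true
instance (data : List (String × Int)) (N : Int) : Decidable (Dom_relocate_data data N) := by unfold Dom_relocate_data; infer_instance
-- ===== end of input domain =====

-- B replaces A's pop-and-reinsert loop over the first N%len keys by slicing the full rotated
-- key order and rebuilding the dict via clear/update (simpler decomposition; both mutate the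
-- argument dict in place in Python — the equivalence proved here is about the returned value).


-- ===== PORT A =====
-- first loop of A: collect keys while difference > 0, break otherwise
def pvCollect (ks : List String) (difference : Int) : List String :=
  match ks with
  | [] => []
  | k :: rest => if difference > 0 then k :: pvCollect rest (difference - 1) else []

-- one iteration of A's second loop: data[key] = data.pop(key)
def pvMove (d : PySem.Dict String Int) (k : String) : PySem.Dict String Int :=
  match d.pop? k with
  | some (v, d') => d'.insert k v
  | none => d    -- unreachable under Pre_ (pop would raise KeyError); totalising guard only

def relocate_data (data : List (String × Int)) (N : Int) : List (String × Int) :=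
  let length : Int := data.length
  let difference := PySem.Int.mod N length
  let temp := pvCollect (data.map (·.1)) difference
  (temp.foldl pvMove (PySem.Dict.mk data)).items

-- ===== PORT B =====
def relocate_data_alt (data : List (String × Int)) (N : Int) : List (String × Int) :=
  let diff := PySem.Int.mod N (data.length : Int)
  let keys := data.map (·.1)
  let rot := PySem.List.slice keys (some diff) none ++ PySem.List.slice keys none (some diff)
  let values := PySem.Dict.mk data
  rot.map (fun k => (k, values.getD k 0))

-- ===== PRECONDITION & SPEC =====
-- Pre_ excludes the empty list (Python A raises ZeroDivisionError on N % len(data)) and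
-- duplicate keys (the Python argument is a dict, whose keys are distinct by construction).
def Pre_relocate_data (data : List (String × Int)) (N : Int) : Prop :=
  data ≠ [] ∧ (data.map Prod.fst).Nodup
instance (data : List (String × Int)) (N : Int) : Decidable (Pre_relocate_data data N) := by
  unfold Pre_relocate_data; infer_instance

def pvWitness_relocate_data : (List (String × Int)) × Int := ([("a", 1), ("b", 2), ("c", 3)], 2)

def Spec_relocate_data (data : List (String × Int)) (N : Int) (out : List (String × Int)) : Prop := out = relocate_data_alt data N
instance (data : List (String × Int)) (N : Int) (out : List (String × Int)) : Decidable (Spec_relocate_data data N out) := by unfold Spec_relocate_data; infer_instance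

-- ===== CLAIM (what is proved, stated in full; the proofs are below) =====
def Claim_equal_relocate_data : Prop := ∀ (data : List (String × Int)) (N : Int), Dom_relocate_data data N → Pre_relocate_data data N → Spec_relocate_data data N (relocate_data data N)

-- ===== LEMMAS AND PROOFS =====

-- A's first loop collects exactly the first difference.toNat keys
theorem pvCollect_eq_take (ks : List String) (d : Int) :
    pvCollect ks d = ks.take d.toNat := by
  induction ks generalizing d with
  | nil => simp [pvCollect.eq_def]
  | cons k rest ih =>
    have hred : pvCollect (k :: rest) d
        = if d > 0 then k :: pvCollect rest (d - 1) else [] := rfl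
    by_cases h : d > 0
    · have hn : d.toNat = (d - 1).toNat + 1 := by omega
      rw [hred, if_pos h, ih, hn, List.take_succ_cons]
    · have hn : d.toNat = 0 := by omega
      rw [hred, if_neg h, hn, List.take_zero]

-- moving the keys of a nodup prefix to the back rotates the association list
theorem foldl_pvMove_rotate (L1 L2 : List (String × Int))
    (h : ((L1 ++ L2).map Prod.fst).Nodup) :
    (L1.map Prod.fst).foldl pvMove (PySem.Dict.mk (L1 ++ L2)) = PySem.Dict.mk (L2 ++ L1) := by
  induction L1 generalizing L2 with
  | nil => simp
  | cons p L1' ih =>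
    obtain ⟨k, v⟩ := p
    simp only [List.cons_append, List.map_cons] at h
    have hk : k ∉ ((L1' ++ L2).map Prod.fst) := (List.nodup_cons.mp h).1
    have hperm : (L1' ++ (L2 ++ [(k, v)])).Perm ((k, v) :: (L1' ++ L2)) := by
      rw [← List.append_assoc]
      exact List.perm_append_singleton _ _
    have hnd' : ((L1' ++ (L2 ++ [(k, v)])).map Prod.fst).Nodup :=
      ((hperm.map Prod.fst).nodup_iff).mpr (by simpa using h)
    -- one step: pop the head, append it at the end
    have hstep : pvMove (PySem.Dict.mk ((k, v) :: (L1' ++ L2))) k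
        = PySem.Dict.mk ((L1' ++ L2) ++ [(k, v)]) := by
      have hget : (PySem.Dict.mk ((k, v) :: (L1' ++ L2))).get? k = some v := by
        simp [PySem.Dict.get?, List.find?]
      have herase : (PySem.Dict.mk ((k, v) :: (L1' ++ L2))).erase k
          = PySem.Dict.mk (L1' ++ L2) := by
        simp only [PySem.Dict.erase]
        congr 1
        rw [List.filter_cons_of_neg (by simp)]
        apply List.filter_eq_self.mpr
        intro p hp
        have : p.1 ≠ k := fun hc => hk (by simpa [hc] using List.mem_map_of_mem (f := Prod.fst) hp)
        simp [this]
      have hcont : (PySem.Dict.mk (L1' ++ L2)).contains k = false := by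
        have := hk
        simp only [PySem.Dict.contains, List.any_eq_false]
        intro p hp
        have : p.1 ≠ k := fun hc => hk (by simpa [hc] using List.mem_map_of_mem (f := Prod.fst) hp)
        simpa using this
      simp [pvMove, PySem.Dict.pop?, hget, herase, PySem.Dict.insert, hcont]
    calc (((k, v) :: L1').map Prod.fst).foldl pvMove (PySem.Dict.mk ((k, v) :: L1' ++ L2))
        = (L1'.map Prod.fst).foldl pvMove (PySem.Dict.mk ((L1' ++ L2) ++ [(k, v)])) := by
          simp only [List.map_cons, List.foldl_cons, List.cons_append]
          rw [hstep]
      _ = PySem.Dict.mk ((L2 ++ [(k, v)]) ++ L1') := by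
          have := ih (L2 ++ [(k, v)]) hnd'
          simpa [List.append_assoc] using this
      _ = PySem.Dict.mk (L2 ++ (k, v) :: L1') := by simp

-- looking every key of a nodup association list back up reproduces the list
theorem map_getD_eq_self (data L : List (String × Int))
    (hnd : (data.map Prod.fst).Nodup) (hsub : ∀ p ∈ L, p ∈ data) :
    (L.map Prod.fst).map (fun k => (k, (PySem.Dict.mk data).getD k 0)) = L := by
  rw [List.map_map]
  conv_rhs => rw [← List.map_id L]
  apply List.map_congr_left
  intro p hp
  have : (PySem.Dict.mk data).getD p.1 0 = p.2 :=
    PySem.Dict.getD_of_mem_items (d := PySem.Dict.mk data) (by simpa using hsub p hp)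
      (by simpa [PySem.Dict.keys] using hnd) 0
  simp [Function.comp, this]

-- ===== VERDICT (by name: the statement is the Claim_ definition above) =====
theorem relocate_data_spec : Claim_equal_relocate_data := by
  intro data N _hDom hPre
  obtain ⟨hne, hnd⟩ := hPre
  unfold Spec_relocate_data relocate_data relocate_data_alt
  have hlen : 0 < (data.length : Int) := by
    have : data.length ≠ 0 := fun h => hne (List.length_eq_zero_iff.mp h)
    omega
  set diff := PySem.Int.mod N (data.length : Int) with hdiff
  have h0 : 0 ≤ diff := PySem.Int.mod_nonneg N hlen
  have hlt : diff < (data.length : Int) := PySem.Int.mod_lt N hlen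
  set d := diff.toNat with hd
  -- A's side
  have htake : (data.map (·.1)).take d = (data.take d).map Prod.fst := by
    simp [List.map_take]
  have hsplit : data = data.take d ++ data.drop d := (List.take_append_drop d data).symm
  have hA : (pvCollect (data.map (·.1)) diff).foldl pvMove (PySem.Dict.mk data)
      = PySem.Dict.mk (data.drop d ++ data.take d) := by
    rw [pvCollect_eq_take, ← hd, htake]
    have := foldl_pvMove_rotate (data.take d) (data.drop d)
      (by rw [← hsplit]; exact hnd)
    rw [← hsplit] at this
    exact this
  -- B's side: slices are drop/take, then the lookups reproduce the rotated list
  have hfrom : PySem.List.slice (data.map (·.1)) (some diff) none = (data.map (·.1)).drop d :=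
    PySem.List.slice_from _ h0
  have hto : PySem.List.slice (data.map (·.1)) none (some diff) = (data.map (·.1)).take d :=
    PySem.List.slice_to _ h0
  have hrot : PySem.List.slice (data.map (·.1)) (some diff) none
      ++ PySem.List.slice (data.map (·.1)) none (some diff)
      = (data.drop d ++ data.take d).map Prod.fst := by
    rw [hfrom, hto]; simp [List.map_drop, List.map_take]
  have hB : ((PySem.List.slice (data.map (·.1)) (some diff) none
      ++ PySem.List.slice (data.map (·.1)) none (some diff)).map
        (fun k => (k, (PySem.Dict.mk data).getD k 0)))
      = data.drop d ++ data.take d := by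
    rw [hrot]
    exact map_getD_eq_self data (data.drop d ++ data.take d) hnd
      (by intro p hp; rcases List.mem_append.mp hp with h | h
          · exact List.mem_of_mem_drop h
          · exact List.mem_of_mem_take h)
  simp only [hB]
  rw [← hdiff]
  exact congrArg PySem.Dict.items hA
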